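-- pv_equiv track=rewrite | github.com/pecalleja/PythonLocalDevelopment | src/codesignal/trees/shortest_distance.py | solution
-- ===== SOURCE A (Python) =====
-- from collections import deque
--
-- def solution(roads, start, destination):
--     if start == destination:
--         return 0
--
--     visited = set()  # Track visited cities
--     queue = deque([(start, 0)])  # Queue of (city, distance)
--
--     while queue:
--         current_city, distance = queue.popleft()
--         if current_city in visited:
--             continue
--         visited.add(current_city)
--
--         for neighbor in roads.get(current_city, []):
--             if neighbor == destination:
--                 return distance + 1
--             if neighbor not in visited:
--                 queue.append((neighbor, distance + 1))
--
--     return None  # No path to the destination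
-- ===== SOURCE B (Python) =====
-- def solution(roads, start, destination):
--     if start == destination:
--         return 0
--     visited = set()
--     frontier = [start]
--     dist = 0
--     while frontier:
--         visited.update(frontier)
--         dist += 1
--         nxt = []
--         for city in frontier:
--             for n in roads.get(city, []):
--                 if n == destination:
--                     return dist
--                 if n not in visited and n not in nxt:
--                     nxt.append(n)
--         frontier = nxt
--     return None
-- ===== Notes on version B (the rewrite author's own statement) =====
-- stated objective: alternative
-- what changed: Replaced the per-node (city, distance) deque BFS with level-synchronous BFS: a frontier list of distinct unvisited cities and a single integer distance per level, marking the whole level visited at once and building the next frontier deduplicated.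
import Mathlib
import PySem

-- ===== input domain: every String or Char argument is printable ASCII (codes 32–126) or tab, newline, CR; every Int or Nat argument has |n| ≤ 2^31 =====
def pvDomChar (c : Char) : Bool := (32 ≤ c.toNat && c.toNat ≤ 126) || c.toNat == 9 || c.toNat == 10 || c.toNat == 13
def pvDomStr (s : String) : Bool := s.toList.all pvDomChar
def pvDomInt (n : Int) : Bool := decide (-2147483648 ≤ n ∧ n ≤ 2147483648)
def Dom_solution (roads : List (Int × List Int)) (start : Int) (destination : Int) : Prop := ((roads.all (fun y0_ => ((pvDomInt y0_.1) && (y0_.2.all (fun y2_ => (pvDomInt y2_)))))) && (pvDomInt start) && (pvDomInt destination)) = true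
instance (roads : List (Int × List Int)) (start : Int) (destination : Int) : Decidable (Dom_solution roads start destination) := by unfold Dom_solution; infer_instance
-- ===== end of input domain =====

-- B is the same BFS task by a level-synchronous decomposition (frontier per level, one distance counter) instead of A's per-node (city, distance) deque; equivalence is about the return value (neither Python mutates its arguments).

-- ===== PORT A =====

-- roads.get(city, []) with dict first-match semantics
def pvAdj (roads : List (Int × List Int)) (c : Int) : List Int :=
  ((PySem.Dict.mk roads).get? c).getD []

-- termination measure helper: total adjacency mass of unvisited keys (proof device for WF recursion only)
def pvS (roads : List (Int × List Int)) (v : PySem.Set Int) : Nat :=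
  ((roads.filter (fun p => !(PySem.Set.contains v p.1))).map (fun p => p.2.length)).sum

theorem pvAdj_nil (c : Int) : pvAdj [] c = [] := rfl

theorem pvAdj_cons (k : Int) (l : List Int) (rs : List (Int × List Int)) (c : Int) :
    pvAdj ((k, l) :: rs) c = if k = c then l else pvAdj rs c := by
  simp [pvAdj, PySem.Dict.get?_mk_cons]
  split_ifs with h
  · simp
  · rfl

theorem pvS_cons (p : Int × List Int) (rs : List (Int × List Int)) (v : PySem.Set Int) :
    pvS (p :: rs) v = (if PySem.Set.contains v p.1 then 0 else p.2.length) + pvS rs v := by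
  simp [pvS, List.filter_cons]
  split_ifs with h <;> simp_all

theorem pvMem_add (v : PySem.Set Int) (c x : Int) :
    x ∈ PySem.Set.add v c ↔ x ∈ v ∨ x = c := PySem.Set.mem_add v c x

theorem pvS_mono (roads : List (Int × List Int)) (v w : PySem.Set Int)
    (h : ∀ x, x ∈ v → x ∈ w) :
    pvS roads w ≤ pvS roads v := by
  induction roads with
  | nil => simp [pvS]
  | cons p rs ih =>
    rw [pvS_cons, pvS_cons]
    by_cases hv : p.1 ∈ v
    · have hw : p.1 ∈ w := h _ hv
      simp [hv, hw]; omega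
    · by_cases hw : p.1 ∈ w
      · simp [hv, hw]; omega
      · simp [hv, hw]; omega

theorem pvS_add_le (roads : List (Int × List Int)) (v : PySem.Set Int) (c : Int)
    (hc : c ∉ v) :
    (pvAdj roads c).length + pvS roads (PySem.Set.add v c) ≤ pvS roads v := by
  induction roads with
  | nil => simp [pvAdj_nil, pvS]
  | cons p rs ih =>
    obtain ⟨k, l⟩ := p
    rw [pvS_cons, pvS_cons, pvAdj_cons]
    have hmemk : k ∈ PySem.Set.add v c ↔ k ∈ v ∨ k = c := pvMem_add v c k
    by_cases hk : k = c
    · subst hk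
      have hmono : pvS rs (v ++ [k]) ≤ pvS rs v := by
        apply pvS_mono
        intro x hx
        simp [hx]
      simp [hc]
      omega
    · simp only [hk, if_false]
      by_cases hvk : k ∈ v
      · have : k ∈ PySem.Set.add v c := hmemk.2 (Or.inl hvk)
        simp [hvk, this]; omega
      · have : k ∉ PySem.Set.add v c := fun hm => (hmemk.1 hm).elim hvk hk
        simp [hvk, this]; omega

-- inner for-loop of A: scan neighbors, early-return (none) when destination is seen,
-- otherwise append unvisited neighbors (with distance d+1) to the queue
def pvScanA (dest : Int) (ns : List Int) (v : PySem.Set Int) (d : Int) (q : List (Int × Int)) :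
    Option (List (Int × Int)) :=
  match ns with
  | [] => some q
  | n :: t =>
    if n = dest then none
    else pvScanA dest t v d (if !(PySem.Set.contains v n) then q ++ [(n, d + 1)] else q)

theorem pvScanA_len (dest : Int) (ns : List Int) (v : PySem.Set Int) (d : Int) :
    ∀ q q', pvScanA dest ns v d q = some q' → q'.length ≤ q.length + ns.length := by
  induction ns with
  | nil => intro q q' h; simp [pvScanA] at h; simp [h]
  | cons n t ih =>
    intro q q' h
    simp only [pvScanA] at h
    by_cases h1 : n = dest
    · simp [h1] at h
    · rw [if_neg h1] at h
      have := ih _ _ h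
      by_cases h2 : (!(PySem.Set.contains v n)) = true
      · rw [if_pos h2] at this; simp at this ⊢; omega
      · rw [if_neg h2] at this; simp at this ⊢; omega

def pvLoopA (roads : List (Int × List Int)) (dest : Int) (q : List (Int × Int)) (v : PySem.Set Int) :
    Option Int :=
  match q with
  | [] => none
  | (c, dd) :: rest =>
    if hv : PySem.Set.contains v c then pvLoopA roads dest rest v
    else
      match hs : pvScanA dest (pvAdj roads c) (PySem.Set.add v c) dd rest with
      | none => some (dd + 1)
      | some q' => pvLoopA roads dest q' (PySem.Set.add v c)
termination_by q.length + pvS roads v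
decreasing_by
  · simp
  · have h1 := pvScanA_len dest (pvAdj roads c) (PySem.Set.add v c) dd rest q' hs
    have h2 := pvS_add_le roads v c (by simpa using hv)
    simp; omega

def solution (roads : List (Int × List Int)) (start : Int) (destination : Int) : Option Int :=
  if start = destination then some 0
  else pvLoopA roads destination [(start, 0)] PySem.Set.empty

-- ===== PORT B =====

-- inner neighbor loop of B: early-return (none) on destination, else collect new frontier cities
def pvBScan (dest : Int) (ns : List Int) (v' nxt : List Int) : Option (List Int) :=
  match ns with
  | [] => some nxt
  | n :: t =>
    if n = dest then none
    else pvBScan dest t v' (if !(PySem.Set.contains v' n) && !(nxt.contains n) then nxt ++ [n] else nxt)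

-- loop over the frontier cities of one level
def pvBInner (roads : List (Int × List Int)) (dest : Int) (fr : List Int) (v' nxt : List Int) :
    Option (List Int) :=
  match fr with
  | [] => some nxt
  | c :: cs =>
    match pvBScan dest (pvAdj roads c) v' nxt with
    | none => none
    | some nxt' => pvBInner roads dest cs v' nxt'

theorem pvBScan_len (dest : Int) (ns : List Int) (v' : List Int) :
    ∀ nxt nxt', pvBScan dest ns v' nxt = some nxt' → nxt'.length ≤ nxt.length + ns.length := by
  induction ns with
  | nil => intro q q' h; simp [pvBScan] at h; simp [h]
  | cons n t ih =>
    intro q q' h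
    simp only [pvBScan] at h
    by_cases h1 : n = dest
    · simp [h1] at h
    · rw [if_neg h1] at h
      have := ih _ _ h
      by_cases h2 : (!(PySem.Set.contains v' n) && !(q.contains n)) = true
      · rw [if_pos h2] at this; simp at this ⊢; omega
      · rw [if_neg h2] at this; simp at this ⊢; omega

theorem pvBScan_nodup (dest : Int) (ns : List Int) (v' : List Int) :
    ∀ nxt nxt', pvBScan dest ns v' nxt = some nxt' → nxt.Nodup → nxt'.Nodup := by
  induction ns with
  | nil => intro q q' h hn; simp [pvBScan] at h; simpa [h] using hn
  | cons n t ih =>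
    intro q q' h hn
    simp only [pvBScan] at h
    by_cases h1 : n = dest
    · simp [h1] at h
    · rw [if_neg h1] at h
      apply ih _ _ h
      by_cases h2 : (!(PySem.Set.contains v' n) && !(q.contains n)) = true
      · rw [if_pos h2]
        refine List.Nodup.append hn (by simp) ?_
        intro a ha hb
        simp at hb; subst hb
        simp at h2
        exact absurd ha h2.2
      · rw [if_neg h2]; exact hn

theorem pvBScan_disj (dest : Int) (ns : List Int) (v' : List Int) :
    ∀ nxt nxt', pvBScan dest ns v' nxt = some nxt' →
      (∀ x ∈ nxt, x ∉ v') →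
      ∀ x ∈ nxt', x ∉ v' := by
  induction ns with
  | nil => intro q q' h hd; simp [pvBScan] at h; simpa [h] using hd
  | cons n t ih =>
    intro q q' h hd
    simp only [pvBScan] at h
    by_cases h1 : n = dest
    · simp [h1] at h
    · rw [if_neg h1] at h
      apply ih _ _ h
      by_cases h2 : (!(PySem.Set.contains v' n) && !(q.contains n)) = true
      · rw [if_pos h2]
        intro x hx
        simp at hx
        rcases hx with hx | hx
        · exact hd x hx
        · subst hx; simp at h2; exact h2.1
      · rw [if_neg h2]; exact hd

theorem pvBInner_len (roads : List (Int × List Int)) (dest : Int) (fr : List Int) (v' : List Int) :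
    ∀ nxt nxt', pvBInner roads dest fr v' nxt = some nxt' →
      nxt'.length ≤ nxt.length + (fr.map (fun c => (pvAdj roads c).length)).sum := by
  induction fr with
  | nil => intro q q' h; simp [pvBInner] at h; simp [h]
  | cons c cs ih =>
    intro q q' h
    simp only [pvBInner] at h
    cases hs : pvBScan dest (pvAdj roads c) v' q with
    | none => rw [hs] at h; exact absurd h (by simp)
    | some q1 =>
      rw [hs] at h
      have h1 := pvBScan_len dest (pvAdj roads c) v' q q1 hs
      have h2 := ih _ _ h
      simp; omega

theorem pvBInner_nodup (roads : List (Int × List Int)) (dest : Int) (fr : List Int) (v' : List Int) :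
    ∀ nxt nxt', pvBInner roads dest fr v' nxt = some nxt' → nxt.Nodup → nxt'.Nodup := by
  induction fr with
  | nil => intro q q' h hn; simp [pvBInner] at h; simpa [h] using hn
  | cons c cs ih =>
    intro q q' h hn
    simp only [pvBInner] at h
    cases hs : pvBScan dest (pvAdj roads c) v' q with
    | none => rw [hs] at h; exact absurd h (by simp)
    | some q1 => rw [hs] at h; exact ih _ _ h (pvBScan_nodup _ _ _ _ _ hs hn)

theorem pvBInner_disj (roads : List (Int × List Int)) (dest : Int) (fr : List Int) (v' : List Int) :
    ∀ nxt nxt', pvBInner roads dest fr v' nxt = some nxt' →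
      (∀ x ∈ nxt, x ∉ v') →
      ∀ x ∈ nxt', x ∉ v' := by
  induction fr with
  | nil => intro q q' h hd; simp [pvBInner] at h; simpa [h] using hd
  | cons c cs ih =>
    intro q q' h hd
    simp only [pvBInner] at h
    cases hs : pvBScan dest (pvAdj roads c) v' q with
    | none => rw [hs] at h; exact absurd h (by simp)
    | some q1 => rw [hs] at h; exact ih _ _ h (pvBScan_disj _ _ _ _ _ hs hd)

theorem pvSum_le (roads : List (Int × List Int)) (F : List Int) :
    ∀ v : PySem.Set Int, F.Nodup → (∀ c ∈ F, c ∉ v) →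
      (F.map (fun c => (pvAdj roads c).length)).sum + pvS roads (PySem.Set.update v F) ≤ pvS roads v := by
  induction F with
  | nil => intro v _ _; simp [PySem.Set.update]
  | cons c cs ih =>
    intro v hn hd
    rw [PySem.Set.update_cons]
    have h1 := ih (PySem.Set.add v c) (by simp at hn; exact hn.2) ?_
    · have h2 := pvS_add_le roads v c (hd c (by simp))
      simp; simp at h1; omega
    · intro x hx hm
      rcases (pvMem_add v c x).1 hm with h' | h'
      · exact hd x (by simp [hx]) h'
      · simp at hn; exact hn.1 (h' ▸ hx)

def pvLoopB (roads : List (Int × List Int)) (dest : Int) (frontier v : List Int) (dist : Int)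
    (h : frontier.Nodup ∧ ∀ c ∈ frontier, c ∉ v) : Option Int :=
  match frontier with
  | [] => none
  | c :: cs =>
    match hb : pvBInner roads dest (c :: cs) (PySem.Set.update v (c :: cs)) [] with
    | none => some (dist + 1)
    | some nxt =>
      pvLoopB roads dest nxt (PySem.Set.update v (c :: cs)) (dist + 1)
        ⟨pvBInner_nodup _ _ _ _ _ _ hb (by simp),
         fun x hx => pvBInner_disj _ _ _ _ _ _ hb (by simp) x hx⟩
termination_by frontier.length + 2 * pvS roads v
decreasing_by
  have h1 := pvBInner_len roads dest (c :: cs) (PySem.Set.update v (c :: cs)) [] nxt hb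
  have h2 := pvSum_le roads (c :: cs) v h.1 h.2
  have h3 : pvS roads (PySem.Set.update v (c :: cs)) ≤ pvS roads v := by
    apply pvS_mono
    intro x hx
    exact (PySem.Set.mem_update v (c :: cs) x).2 (Or.inl hx)
  simp at h1 h2 ⊢; omega

def solution_alt (roads : List (Int × List Int)) (start : Int) (destination : Int) : Option Int :=
  if start = destination then some 0
  else pvLoopB roads destination [start] PySem.Set.empty 0 ⟨by simp, by simp [PySem.Set.empty]⟩

-- ===== PRECONDITION & SPEC =====
def Spec_solution (roads : List (Int × List Int)) (start : Int) (destination : Int) (out : Option Int) : Prop := out = solution_alt roads start destination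
instance (roads : List (Int × List Int)) (start : Int) (destination : Int) (out : Option Int) : Decidable (Spec_solution roads start destination out) := by unfold Spec_solution; infer_instance

-- ===== CLAIM (what is proved, stated in full; the proofs are below) =====
def Claim_equal_solution : Prop := ∀ (roads : List (Int × List Int)) (start : Int) (destination : Int), Dom_solution roads start destination → Spec_solution roads start destination (solution roads start destination)

-- ===== LEMMAS AND PROOFS =====

-- proof-side twin of pvLoopA with the queue split into the current level P (distance d)
-- and the accumulated next level N (distance d+1)

def pvScanC (dest : Int) (ns : List Int) (v : PySem.Set Int) : Option (List Int) :=
  match ns with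
  | [] => some []
  | n :: t =>
    if n = dest then none
    else
      match pvScanC dest t v with
      | none => none
      | some l => some (if !(PySem.Set.contains v n) then n :: l else l)

theorem pvScanC_len (dest : Int) (ns : List Int) (v : PySem.Set Int) :
    ∀ l, pvScanC dest ns v = some l → l.length ≤ ns.length := by
  induction ns with
  | nil => intro l h; simp [pvScanC] at h; simp [← h]
  | cons n t ih =>
    intro l h
    simp only [pvScanC] at h
    by_cases h1 : n = dest
    · simp [h1] at h
    · rw [if_neg h1] at h
      cases hs : pvScanC dest t v with
      | none => rw [hs] at h; exact absurd h (by simp)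
      | some l0 =>
        rw [hs] at h
        have := ih _ hs
        simp only [Option.some.injEq] at h
        subst h
        by_cases h2 : (!(PySem.Set.contains v n)) = true
        · rw [if_pos h2]; simp; omega
        · rw [if_neg h2]; simp; omega

def pvLoopC (roads : List (Int × List Int)) (dest : Int) (P N : List Int) (v : PySem.Set Int)
    (d : Int) : Option Int :=
  match P with
  | [] =>
    match N with
    | [] => none
    | n :: N' => pvLoopC roads dest (n :: N') [] v (d + 1)
  | c :: P' =>
    if c ∈ v then pvLoopC roads dest P' N v d
    else
      match hs : pvScanC dest (pvAdj roads c) (PySem.Set.add v c) with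
      | none => some (d + 1)
      | some new => pvLoopC roads dest P' (N ++ new) (PySem.Set.add v c) d
termination_by ((P.length + N.length + pvS roads v, N.length) : Nat × Nat)
decreasing_by
  · apply Prod.Lex.right'
    · simp only [List.length_cons, List.length_nil]; omega
    · simp only [List.length_cons, List.length_nil]; omega
  · apply Prod.Lex.left
    simp only [List.length_cons]; omega
  · apply Prod.Lex.left
    have h1 := pvScanC_len _ _ _ _ hs
    have h2 := pvS_add_le roads v c (by assumption : ¬ c ∈ v)
    simp only [List.length_cons, List.length_append]; omega

-- pvScanA is pvScanC plus the queue bookkeeping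
theorem pvScanA_eq (dest : Int) (ns : List Int) (v : PySem.Set Int) (d : Int) :
    ∀ q, pvScanA dest ns v d q =
      (pvScanC dest ns v).map (fun l => q ++ l.map (fun n => (n, d + 1))) := by
  induction ns with
  | nil => intro q; simp [pvScanA, pvScanC]
  | cons n t ih =>
    intro q
    simp only [pvScanA, pvScanC]
    by_cases h1 : n = dest
    · simp [h1]
    · rw [if_neg h1, if_neg h1, ih]
      cases hs : pvScanC dest t v with
      | none => simp
      | some l =>
        by_cases hm : n ∈ v
        · simp [hm]
        · simp [hm]

-- splitting A's queue into levels: pvLoopA on a two-level queue is pvLoopC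
theorem pvLoopA_eq_pvLoopC (roads : List (Int × List Int)) (dest : Int) :
    ∀ (P N : List Int) (v : PySem.Set Int) (d : Int),
      pvLoopA roads dest (P.map (fun c => (c, d)) ++ N.map (fun c => (c, d + 1))) v =
        pvLoopC roads dest P N v d := by
  intro P N v d
  induction P, N, v, d using pvLoopC.induct roads dest with
  | case1 v d => simp [pvLoopA, pvLoopC]
  | case2 v d n t ih =>
    rw [pvLoopC]
    rw [← ih]
    simp
  | case3 N v d c P' hv ih =>
    rw [pvLoopC, if_pos hv]
    have hcv : PySem.Set.contains v c = true := (PySem.Set.contains_iff v c).2 hv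
    simp only [List.map_cons, List.cons_append, pvLoopA]
    rw [dif_pos hcv]
    exact ih
  | case4 N v d c P' hv hs =>
    rw [pvLoopC, if_neg hv, hs]
    have hcv : ¬ PySem.Set.contains v c = true := by
      intro hb; exact hv ((PySem.Set.contains_iff v c).1 hb)
    simp only [List.map_cons, List.cons_append, pvLoopA]
    rw [dif_neg hcv, pvScanA_eq, hs]
    simp
  | case5 N v d c P' hv new hs ih =>
    rw [pvLoopC, if_neg hv, hs]
    have hcv : ¬ PySem.Set.contains v c = true := by
      intro hb; exact hv ((PySem.Set.contains_iff v c).1 hb)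
    simp only [List.map_cons, List.cons_append, pvLoopA]
    rw [dif_neg hcv, pvScanA_eq, hs]
    simp only [Option.map_some]
    rw [← ih]
    simp [List.map_append]

-- skipping an already-visited queue entry does not change pvLoopC
theorem pvLoopC_skip_visited (roads : List (Int × List Int)) (dest : Int) :
    ∀ (P1 : List Int) (P2 N : List Int) (v : PySem.Set Int) (d c : Int), c ∈ v →
      pvLoopC roads dest (P1 ++ c :: P2) N v d = pvLoopC roads dest (P1 ++ P2) N v d := by
  intro P1
  induction P1 with
  | nil =>
    intro P2 N v d c hc
    simp only [List.nil_append]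
    rw [pvLoopC, if_pos hc]
  | cons p P1' ih =>
    intro P2 N v d c hc
    simp only [List.cons_append]
    rw [pvLoopC, pvLoopC]
    by_cases hp : p ∈ v
    · rw [if_pos hp, if_pos hp, ih _ _ _ _ _ hc]
    · rw [if_neg hp, if_neg hp]
      cases hs : pvScanC dest (pvAdj roads p) (PySem.Set.add v p) with
      | none => rfl
      | some new =>
        exact ih _ _ _ _ _ ((pvMem_add v p c).2 (Or.inl hc))

-- a queue entry duplicating an earlier one does not change pvLoopC
theorem pvLoopC_skip_dup (roads : List (Int × List Int)) (dest : Int) :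
    ∀ (P1 : List Int) (P2 N : List Int) (v : PySem.Set Int) (d c : Int), c ∈ P1 →
      pvLoopC roads dest (P1 ++ c :: P2) N v d = pvLoopC roads dest (P1 ++ P2) N v d := by
  intro P1
  induction P1 with
  | nil => intro _ _ _ _ _ hc; simp at hc
  | cons p P1' ih =>
    intro P2 N v d c hc
    simp only [List.cons_append]
    rw [pvLoopC, pvLoopC]
    by_cases hp : p ∈ v
    · rw [if_pos hp, if_pos hp]
      rcases List.mem_cons.1 hc with hc' | hc'
      · subst hc'; exact pvLoopC_skip_visited roads dest P1' P2 N v d c hp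
      · exact ih _ _ _ _ _ hc'
    · rw [if_neg hp, if_neg hp]
      cases hs : pvScanC dest (pvAdj roads p) (PySem.Set.add v p) with
      | none => rfl
      | some new =>
        rcases List.mem_cons.1 hc with hc' | hc'
        · subst hc'
          exact pvLoopC_skip_visited roads dest P1' P2 (N ++ new) (PySem.Set.add v c) d c
            ((pvMem_add v c c).2 (Or.inr rfl))
        · exact ih _ _ _ _ _ hc'

-- the cleanup (filter-unvisited + first-occurrence dedup) that B's frontier applies
def pvClean (v : PySem.Set Int) (acc : List Int) : List Int → List Int
  | [] => acc
  | n :: t => if n ∈ v ∨ n ∈ acc then pvClean v acc t else pvClean v (acc ++ [n]) t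

theorem pvClean_append (v : PySem.Set Int) (X Y : List Int) :
    ∀ acc, pvClean v acc (X ++ Y) = pvClean v (pvClean v acc X) Y := by
  induction X with
  | nil => intro acc; simp [pvClean]
  | cons n t ih =>
    intro acc
    simp only [List.cons_append, pvClean]
    by_cases h : n ∈ v ∨ n ∈ acc
    · rw [if_pos h, if_pos h, ih]
    · rw [if_neg h, if_neg h, ih]

theorem pvClean_filter (v w : PySem.Set Int) (hsub : ∀ x ∈ w, x ∈ v) (ns : List Int) :
    ∀ acc, pvClean v acc (ns.filter (fun n => !(PySem.Set.contains w n))) = pvClean v acc ns := by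
  induction ns with
  | nil => intro acc; simp
  | cons n t ih =>
    intro acc
    rw [List.filter_cons]
    by_cases hw : n ∈ w
    · have hc1 : (!(PySem.Set.contains w n)) = false := by simp [hw]
      rw [hc1]
      simp only [Bool.false_eq_true, if_false]
      rw [ih, pvClean, if_pos (Or.inl (hsub n hw))]
    · have hc1 : (!(PySem.Set.contains w n)) = true := by simp [hw]
      rw [hc1, if_pos rfl, pvClean, pvClean]
      by_cases h : n ∈ v ∨ n ∈ acc
      · rw [if_pos h, if_pos h, ih]
      · rw [if_neg h, if_neg h, ih]

-- at a level boundary, the raw accumulated next level can be replaced by its cleanup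
theorem pvLoopC_clean (roads : List (Int × List Int)) (dest : Int) (v : PySem.Set Int) (d : Int) :
    ∀ (N acc : List Int),
      pvLoopC roads dest (acc ++ N) [] v d = pvLoopC roads dest (pvClean v acc N) [] v d := by
  intro N
  induction N with
  | nil => intro acc; simp [pvClean]
  | cons n t ih =>
    intro acc
    rw [pvClean]
    by_cases h : n ∈ v ∨ n ∈ acc
    · rw [if_pos h, ← ih]
      rcases h with h | h
      · exact pvLoopC_skip_visited roads dest acc t [] v d n h
      · exact pvLoopC_skip_dup roads dest acc t [] v d n h
    · rw [if_neg h, ← ih, List.append_cons]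

-- pvScanC: early return exactly when the destination is a neighbor; otherwise the unvisited filter
theorem pvScanC_of_mem (dest : Int) (ns : List Int) (v : PySem.Set Int) (h : dest ∈ ns) :
    pvScanC dest ns v = none := by
  induction ns with
  | nil => simp at h
  | cons n t ih =>
    rw [pvScanC]
    by_cases h1 : n = dest
    · rw [if_pos h1]
    · rw [if_neg h1]
      have : dest ∈ t := by
        rcases List.mem_cons.1 h with h' | h'
        · exact absurd h'.symm h1
        · exact h'
      rw [ih this]

theorem pvScanC_of_not_mem (dest : Int) (ns : List Int) (v : PySem.Set Int) (h : dest ∉ ns) :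
    pvScanC dest ns v = some (ns.filter (fun n => !(PySem.Set.contains v n))) := by
  induction ns with
  | nil => simp [pvScanC]
  | cons n t ih =>
    have h1 : n ≠ dest := fun he => h (by simp [he])
    have h2 : dest ∉ t := fun ht => h (by simp [ht])
    rw [pvScanC, if_neg h1, ih h2, List.filter_cons]

-- pvBScan: early return exactly when the destination is a neighbor; otherwise pvClean
theorem pvBScan_of_mem (dest : Int) (ns : List Int) (v' : List Int) (h : dest ∈ ns) :
    ∀ nxt, pvBScan dest ns v' nxt = none := by
  induction ns with
  | nil => simp at h
  | cons n t ih =>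
    intro nxt
    rw [pvBScan]
    by_cases h1 : n = dest
    · rw [if_pos h1]
    · rw [if_neg h1]
      have : dest ∈ t := by
        rcases List.mem_cons.1 h with h' | h'
        · exact absurd h'.symm h1
        · exact h'
      rw [ih this]

theorem pvBScan_of_not_mem (dest : Int) (ns : List Int) (v' : List Int) (h : dest ∉ ns) :
    ∀ nxt, pvBScan dest ns v' nxt = some (pvClean v' nxt ns) := by
  induction ns with
  | nil => intro nxt; simp [pvBScan, pvClean]
  | cons n t ih =>
    intro nxt
    have h1 : n ≠ dest := fun he => h (by simp [he])
    have h2 : dest ∉ t := fun ht => h (by simp [ht])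
    rw [pvBScan, if_neg h1, ih h2, pvClean]
    by_cases h3 : n ∈ v' ∨ n ∈ nxt
    · have hc1 : (!(PySem.Set.contains v' n) && !(nxt.contains n)) = false := by
        rcases h3 with h' | h' <;> simp [h']
      rw [hc1, if_pos h3]
      simp
    · have hnm : n ∉ v' := fun h' => h3 (Or.inl h')
      have hna : n ∉ nxt := fun h' => h3 (Or.inr h')
      have hc1 : (!(PySem.Set.contains v' n) && !(nxt.contains n)) = true := by
        simp [hna, hnm]
      rw [hc1, if_pos rfl, if_neg h3]

theorem pvUpdate_snoc (v : PySem.Set Int) (P : List Int) (c : Int) :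
    PySem.Set.update v (P ++ [c]) = PySem.Set.add (PySem.Set.update v P) c := by
  simp [PySem.Set.update, List.foldl_append]

-- one whole level of pvLoopC, against B's inner loop over the same (cleaned) frontier
theorem pvLevel (roads : List (Int × List Int)) (dest : Int) (v : PySem.Set Int) (F : List Int)
    (d : Int) (hF : F.Nodup) (hFd : ∀ c ∈ F, c ∉ v) :
    ∀ (Fr Pdone N nxt : List Int), F = Pdone ++ Fr →
      nxt = pvClean (PySem.Set.update v F) [] N →
      pvLoopC roads dest Fr N (PySem.Set.update v Pdone) d =
        (match pvBInner roads dest Fr (PySem.Set.update v F) nxt with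
         | none => some (d + 1)
         | some nxt' => pvLoopC roads dest nxt' [] (PySem.Set.update v F) (d + 1)) := by
  intro Fr
  induction Fr with
  | nil =>
    intro Pdone N nxt hsplit hnxt
    have hP : Pdone = F := by simp [hsplit]
    subst hP
    have hr : (match pvBInner roads dest [] (PySem.Set.update v Pdone) nxt with
        | none => some (d + 1)
        | some nxt' => pvLoopC roads dest nxt' [] (PySem.Set.update v Pdone) (d + 1)) =
          pvLoopC roads dest nxt [] (PySem.Set.update v Pdone) (d + 1) := rfl
    rw [hr]
    cases N with
    | nil =>
      simp [pvClean] at hnxt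
      subst hnxt
      rw [pvLoopC, pvLoopC]
    | cons n N' =>
      rw [pvLoopC]
      have hc := pvLoopC_clean roads dest (PySem.Set.update v Pdone) (d + 1) (n :: N') []
      simp only [List.nil_append] at hc
      rw [hc, ← hnxt]
  | cons c Fr' ih =>
    intro Pdone N nxt hsplit hnxt
    have hcF : c ∈ F := by rw [hsplit]; simp
    have hF' : (Pdone ++ c :: Fr').Nodup := by rw [← hsplit]; exact hF
    have hcP : c ∉ Pdone := by
      intro hcp
      exact (List.nodup_cons.mp (List.nodup_middle.mp hF')).1 (List.mem_append.2 (Or.inl hcp))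
    have hcv : c ∉ PySem.Set.update v Pdone := by
      intro hm
      rcases (PySem.Set.mem_update v Pdone c).1 hm with h' | h'
      · exact hFd c hcF h'
      · exact hcP h' 
    rw [pvLoopC, if_neg hcv, pvBInner]
    have hsub : ∀ x ∈ PySem.Set.add (PySem.Set.update v Pdone) c, x ∈ PySem.Set.update v F := by
      intro x hx
      rcases (pvMem_add _ c x).1 hx with h' | h'
      · rcases (PySem.Set.mem_update v Pdone x).1 h' with h'' | h''
        · exact (PySem.Set.mem_update v F x).2 (Or.inl h'')
        · exact (PySem.Set.mem_update v F x).2 (Or.inr (by rw [hsplit]; simp [h'']))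
      · exact (PySem.Set.mem_update v F x).2 (Or.inr (h' ▸ hcF))
    by_cases hdest : dest ∈ pvAdj roads c
    · rw [pvScanC_of_mem dest _ _ hdest, pvBScan_of_mem dest _ _ hdest]
    · rw [pvScanC_of_not_mem dest _ _ hdest, pvBScan_of_not_mem dest _ _ hdest]
      have hsnoc := pvUpdate_snoc v Pdone c
      have hIH := ih (Pdone ++ [c])
        (N ++ (pvAdj roads c).filter (fun n => !(PySem.Set.contains (PySem.Set.add (PySem.Set.update v Pdone) c) n)))
        (pvClean (PySem.Set.update v F) nxt (pvAdj roads c))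
        (by rw [hsplit]; simp)
        (by
          rw [pvClean_append, ← hnxt]
          exact (pvClean_filter (PySem.Set.update v F) (PySem.Set.add (PySem.Set.update v Pdone) c)
            hsub (pvAdj roads c) nxt).symm)
      rw [hsnoc] at hIH
      exact hIH

-- whole-BFS equivalence: pvLoopC on a clean frontier is pvLoopB
theorem pvLoopC_eq_pvLoopB (roads : List (Int × List Int)) (dest : Int) :
    ∀ (n : Nat) (F : List Int) (v : PySem.Set Int) (d : Int)
      (hb : F.length + 2 * pvS roads v ≤ n) (hn : F.Nodup) (hd : ∀ c ∈ F, c ∉ v),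
      pvLoopC roads dest F [] v d = pvLoopB roads dest F v d ⟨hn, hd⟩ := by
  intro n
  induction n with
  | zero =>
    intro F v d hb hn hd
    have : F = [] := by
      cases F with
      | nil => rfl
      | cons c cs => simp at hb
    subst this
    rw [pvLoopC, pvLoopB]
  | succ m ih =>
    intro F v d hb hn hd
    cases F with
    | nil => rw [pvLoopC, pvLoopB]
    | cons c cs =>
      have hlevel := pvLevel roads dest v (c :: cs) d hn hd (c :: cs) [] [] []
        (by simp) (by simp [pvClean])
      have hup : PySem.Set.update v ([] : List Int) = v := rfl
      rw [hup] at hlevel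
      rw [hlevel, pvLoopB]
      split
      · split
        · rfl
        · rename_i heq nxt2 hb2
          rw [heq] at hb2
          cases hb2
      · rename_i nxt heq
        split
        · rename_i hb2
          rw [heq] at hb2
          cases hb2
        · rename_i nxt2 hb2
          rw [heq] at hb2
          injection hb2 with hb3
          subst hb3
          have h1 := pvBInner_len roads dest (c :: cs) (PySem.Set.update v (c :: cs)) [] nxt heq
          have h2 := pvSum_le roads (c :: cs) v hn hd
          have h3 : pvS roads (PySem.Set.update v (c :: cs)) ≤ pvS roads v := by
            apply pvS_mono
            intro x hx
            exact (PySem.Set.mem_update v (c :: cs) x).2 (Or.inl hx)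
          apply ih
          · simp at h1 h2 hb ⊢
            omega
          · exact pvBInner_nodup _ _ _ _ _ _ heq (by simp)
          · intro x hx
            exact pvBInner_disj _ _ _ _ _ _ heq (by simp) x hx

theorem solution_main : ∀ (roads : List (Int × List Int)) (start destination : Int),
    solution roads start destination = solution_alt roads start destination := by
  intro roads start destination
  unfold solution solution_alt
  by_cases h : start = destination
  · rw [if_pos h, if_pos h]
  · rw [if_neg h, if_neg h]
    have hA : [((start : Int), (0 : Int))] =
        ([start].map (fun c => (c, (0 : Int))) ++ ([] : List Int).map (fun c => (c, (0 : Int) + 1))) := by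
      simp
    rw [hA, pvLoopA_eq_pvLoopC roads destination [start] [] PySem.Set.empty 0]
    exact pvLoopC_eq_pvLoopB roads destination (1 + 2 * pvS roads PySem.Set.empty) [start]
      PySem.Set.empty 0 (by simp) (by simp) (by simp [PySem.Set.empty])

-- ===== VERDICT (by name: the statement is the Claim_ definition above) =====
theorem solution_spec : Claim_equal_solution := by
  intro roads start destination _
  unfold Spec_solution
  exact solution_main roads start destination
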